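-- pv_equiv track=rewrite | github.com/Fondamenti18/fondamenti-di-programmazione | students/1697350/homework03/program03.py | returnBorderPixels
-- ===== SOURCE A (Python) =====
-- def returnBorderPixels(component):
--     newSet = set()
--     min_i = min(i for (i,j) in component)
--     min_j = min(j for (i, j) in component)
--     max_i = max(i for (i,j) in component)
--     max_j = max(j for (i, j) in component)
--     for (i,j) in component:
--         if i == min_i or i == max_i or j == min_j or j == max_j:
--             newSet.add((i,j))
--     return newSet
-- ===== SOURCE B (Python) =====
-- def returnBorderPixels(component):
--     by_i = sorted(component, key=lambda p: p[0])
--     by_j = sorted(component, key=lambda p: p[1])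
--     min_i, max_i = by_i[0][0], by_i[-1][0]
--     min_j, max_j = by_j[0][1], by_j[-1][1]
--     return {(i, j) for (i, j) in component
--             if i == min_i or i == max_i or j == min_j or j == max_j}
-- ===== Notes on version B (the rewrite author's own statement) =====
-- stated objective: alternative
-- what changed: B finds the row/column extremes by sorting the component twice (by row, by column) and reading them off the two ends of each sorted list, instead of A's four separate min()/max() generator scans, then collects border pixels in one set comprehension.
import Mathlib
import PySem

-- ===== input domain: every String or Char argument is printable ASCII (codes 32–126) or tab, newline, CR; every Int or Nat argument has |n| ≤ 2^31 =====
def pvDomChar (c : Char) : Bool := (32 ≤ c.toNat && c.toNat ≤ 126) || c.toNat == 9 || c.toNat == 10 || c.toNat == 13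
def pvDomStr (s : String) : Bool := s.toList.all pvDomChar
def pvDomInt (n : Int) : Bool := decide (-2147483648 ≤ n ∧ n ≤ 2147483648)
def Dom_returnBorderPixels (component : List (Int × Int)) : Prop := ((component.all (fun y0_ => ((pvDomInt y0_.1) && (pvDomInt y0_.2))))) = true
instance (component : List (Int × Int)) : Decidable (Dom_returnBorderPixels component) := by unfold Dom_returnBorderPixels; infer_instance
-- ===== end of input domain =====

-- B reads the four extremes off the ends of two sorted copies of the component instead of A's four min/max scans; an alternative of similar cost.

-- ===== PORT A =====
-- min(...)/max(...) over a nonempty sequence (empty is excluded by Pre_; the 0 default is never reached there)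
def pyMin : List Int → Int
  | [] => 0
  | h :: t => t.foldl min h

def pyMax : List Int → Int
  | [] => 0
  | h :: t => t.foldl max h

def returnBorderPixels (component : List (Int × Int)) : List (Int × Int) :=
  let min_i := pyMin (component.map (fun p => p.1))
  let min_j := pyMin (component.map (fun p => p.2))
  let max_i := pyMax (component.map (fun p => p.1))
  let max_j := pyMax (component.map (fun p => p.2))
  component.foldl
    (fun newSet p =>
      if p.1 == min_i || p.1 == max_i || p.2 == min_j || p.2 == max_j then
        PySem.Set.add newSet p
      else newSet)
    PySem.Set.empty

-- ===== PORT B =====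
def returnBorderPixels_alt (component : List (Int × Int)) : List (Int × Int) :=
  match PySem.List.sorted component (fun p => p.1) false,
        PySem.List.sorted component (fun p => p.2) false with
  | i0 :: irest, j0 :: jrest =>
      let min_i := i0.1
      let max_i := ((i0 :: irest).getLast (List.cons_ne_nil _ _)).1
      let min_j := j0.2
      let max_j := ((j0 :: jrest).getLast (List.cons_ne_nil _ _)).2
      PySem.Set.ofList (component.filter
        (fun p => p.1 == min_i || p.1 == max_i || p.2 == min_j || p.2 == max_j))
  | _, _ => []   -- empty component: Python B raises IndexError here; excluded by Pre_

-- ===== PRECONDITION & SPEC =====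
-- A raises ValueError (min() of an empty sequence) on the empty list; excluded.
def Pre_returnBorderPixels (component : List (Int × Int)) : Prop := component ≠ []
instance (component : List (Int × Int)) : Decidable (Pre_returnBorderPixels component) := by unfold Pre_returnBorderPixels; infer_instance
def pvWitness_returnBorderPixels : (List (Int × Int)) := [(0, 0), (1, 2)]

def Spec_returnBorderPixels (component : List (Int × Int)) (out : List (Int × Int)) : Prop := out = returnBorderPixels_alt component
instance (component : List (Int × Int)) (out : List (Int × Int)) : Decidable (Spec_returnBorderPixels component out) := by unfold Spec_returnBorderPixels; infer_instance

-- ===== CLAIM (what is proved, stated in full; the proofs are below) =====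
def Claim_equal_returnBorderPixels : Prop := ∀ (component : List (Int × Int)), Dom_returnBorderPixels component → Pre_returnBorderPixels component → Spec_returnBorderPixels component (returnBorderPixels component)

-- ===== LEMMAS AND PROOFS =====

-- The head of a key-sorted list carries the minimum of the keys (A's pyMin).
theorem head_key_eq_pyMin (key : (Int × Int) → Int) (l : List (Int × Int))
    (m : Int × Int) (t : List (Int × Int))
    (h : PySem.List.sorted l key false = m :: t) : key m = pyMin (l.map key) := by
  have hmem : m ∈ l := (PySem.List.mem_sorted _ _ _ _).1 (by rw [h]; exact List.mem_cons_self ..)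
  have hle : ∀ y ∈ l, key m ≤ key y := PySem.List.key_head_sorted_le _ _ h
  cases l with
  | nil => simp at hmem
  | cons a xs =>
    have hm := PySem.List.foldl_min_le (xs.map key) (key a)
    have hmm := PySem.List.foldl_min_mem (xs.map key) (key a)
    simp only [List.map_cons, pyMin]
    apply le_antisymm
    · -- key m ≤ fold: the fold's value is some member's key
      rcases hmm with hmm | hmm
      · rw [hmm]; exact hle a (List.mem_cons_self ..)
      · rcases List.mem_map.1 hmm with ⟨y, hy, hyk⟩
        rw [← hyk]; exact hle y (List.mem_cons_of_mem _ hy)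
    · -- fold ≤ key m: m is a member
      rcases List.mem_cons.1 hmem with rfl | hmx
      · exact hm.1
      · exact hm.2 _ (List.mem_map_of_mem hmx)

-- In a list pairwise-ordered by key, the last element's key dominates all.
theorem pairwise_key_le_getLast (key : (Int × Int) → Int) :
    ∀ (l : List (Int × Int)) (hne : l ≠ [])
      (hp : l.Pairwise (fun a b => key a ≤ key b)) (y : Int × Int), y ∈ l →
      key y ≤ key (l.getLast hne) := by
  intro l
  induction l with
  | nil => intro hne; exact absurd rfl hne
  | cons a xs ih =>
    intro hne hp y hy
    cases xs with
    | nil =>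
      simp at hy; subst hy; simp [List.getLast]
    | cons b ys =>
      have hp' := (List.pairwise_cons.1 hp)
      rw [List.getLast_cons (List.cons_ne_nil _ _)]
      rcases List.mem_cons.1 hy with rfl | hyx
      · calc key y ≤ key ((b :: ys).getLast (List.cons_ne_nil _ _)) := by
              exact hp'.1 _ (List.getLast_mem _)
          _ = _ := rfl
      · exact ih (List.cons_ne_nil _ _) hp'.2 y hyx

-- The last element of a key-sorted list carries the maximum of the keys (A's pyMax).
theorem getLast_key_eq_pyMax (key : (Int × Int) → Int) (l : List (Int × Int))
    (m : Int × Int) (t : List (Int × Int))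
    (h : PySem.List.sorted l key false = m :: t) :
    key ((m :: t).getLast (List.cons_ne_nil _ _)) = pyMax (l.map key) := by
  have hpw : (m :: t).Pairwise (fun a b => key a ≤ key b) := by
    rw [← h]; exact PySem.List.sorted_pairwise ..
  have hlastmem : (m :: t).getLast (List.cons_ne_nil _ _) ∈ l := by
    refine (PySem.List.mem_sorted l key false _).1 ?_
    rw [h]; exact List.getLast_mem _
  have hge : ∀ y ∈ l, key y ≤ key ((m :: t).getLast (List.cons_ne_nil _ _)) := by
    intro y hy
    refine pairwise_key_le_getLast key (m :: t) (List.cons_ne_nil _ _) hpw y ?_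
    rw [← h]; exact (PySem.List.mem_sorted l key false y).2 hy
  cases l with
  | nil => simp at hlastmem
  | cons a xs =>
    have hm := PySem.List.le_foldl_max (xs.map key) (key a)
    have hmm := PySem.List.foldl_max_mem (xs.map key) (key a)
    simp only [List.map_cons, pyMax]
    apply le_antisymm
    · rcases List.mem_cons.1 hlastmem with hl | hl
      · rw [hl]; exact hm.1
      · exact hm.2 _ (List.mem_map_of_mem hl)
    · rcases hmm with hmm | hmm
      · rw [hmm]; exact hge a (List.mem_cons_self ..)
      · rcases List.mem_map.1 hmm with ⟨y, hy, hyk⟩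
        rw [← hyk]; exact hge y (List.mem_cons_of_mem _ hy)

-- A's conditional-adding loop builds exactly set-of-the-filtered-list.
theorem foldl_add_filter (c : (Int × Int) → Bool) (l s : List (Int × Int)) :
    l.foldl (fun newSet p => if c p then PySem.Set.add newSet p else newSet) s
    = (l.filter c).foldl PySem.Set.add s := by
  induction l generalizing s with
  | nil => rfl
  | cons h t ih =>
    cases hc : c h with
    | true =>
      simp only [List.foldl_cons, List.filter_cons, hc, if_true]
      exact ih _
    | false =>
      simp only [List.foldl_cons, List.filter_cons, hc, Bool.false_eq_true, if_false]
      exact ih _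

-- ===== VERDICT (by name: the statement is the Claim_ definition above) =====
theorem returnBorderPixels_spec : Claim_equal_returnBorderPixels := by
  intro component _ hpre
  unfold Spec_returnBorderPixels
  cases hsi : PySem.List.sorted component (fun p => p.1) false with
  | nil => exact absurd ((PySem.List.sorted_eq_nil_iff _ _ _).1 hsi) hpre
  | cons i0 irest =>
    cases hsj : PySem.List.sorted component (fun p => p.2) false with
    | nil => exact absurd ((PySem.List.sorted_eq_nil_iff _ _ _).1 hsj) hpre
    | cons j0 jrest =>
      unfold returnBorderPixels returnBorderPixels_alt
      rw [hsi, hsj]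
      simp only
      rw [← head_key_eq_pyMin (fun p => p.1) component i0 irest hsi,
          ← head_key_eq_pyMin (fun p => p.2) component j0 jrest hsj,
          ← getLast_key_eq_pyMax (fun p => p.1) component i0 irest hsi,
          ← getLast_key_eq_pyMax (fun p => p.2) component j0 jrest hsj,
          foldl_add_filter, PySem.Set.ofList_eq_foldl]
      rfl
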